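-- pv_equiv track=rewrite | github.com/greggelong/ebot | pythonEbots/simpleWhyElizaNotProblemFixForComments.py | generate_why_question
-- ===== SOURCE A (Python) =====
-- def generate_why_question(response):
--     # split into a list
--     rlist = response.lower().strip().split()
--     #check for refering to bot, as it is difficult to replace I to you and then you to me
--     refertobot = ["you","yours"]
--     for i in refertobot:
--         if i in rlist:
--             return "Please don't bring me into this.  I am concerned with you."
-- #     #check for negitaves in answers
-- #     negs = ["dont","don't", "not"]
-- #     for i in negs:
-- #         if i in rlist:
-- #             return "Please don't use negative language, like: I don't or I do not"
--     # replace dictionary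
--
--     replaceit = {
--         "i":"you",
--         "am":"are",
--         "me":"you",
--         "mine":"yours",
--         "my":"your",
--         "myself":"yourself",
--         "because": "",
--         }
--     for word in replaceit.keys():
--         # use list comprehension
--         rlist = [replaceit.get(word) if item == word else item for item in rlist]
--     # list to string
--     resultPart = " ".join(rlist)
--     return f"Why do {resultPart.strip()}?" # the you is already .strip to take out white space from because
-- ===== SOURCE B (Python) =====
-- def _translate(w):
--     if w == "i":
--         return "you"
--     elif w == "am":
--         return "are"
--     elif w == "me":
--         return "you"
--     elif w == "mine":
--         return "yours"
--     elif w == "my":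
--         return "your"
--     elif w == "myself":
--         return "yourself"
--     elif w == "because":
--         return ""
--     return w
--
-- def generate_why_question(response):
--     # single fused pass: guard check and translation happen word by word
--     acc = []
--     for w in response.lower().strip().split():
--         if w == "you" or w == "yours":
--             return "Please don't bring me into this.  I am concerned with you."
--         acc.append(_translate(w))
--     return "Why do " + " ".join(acc).strip() + "?"
-- ===== Notes on version B (the rewrite author's own statement) =====
-- stated objective: simpler
-- what changed: A first scans the word list twice for the bot-reference guard and then rescans it once per dictionary key (7 conditional-map passes); B makes one fused pass over the words, checking the guard and translating each word with an if/elif chain as it goes, with no dictionary at all.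
import Mathlib
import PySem

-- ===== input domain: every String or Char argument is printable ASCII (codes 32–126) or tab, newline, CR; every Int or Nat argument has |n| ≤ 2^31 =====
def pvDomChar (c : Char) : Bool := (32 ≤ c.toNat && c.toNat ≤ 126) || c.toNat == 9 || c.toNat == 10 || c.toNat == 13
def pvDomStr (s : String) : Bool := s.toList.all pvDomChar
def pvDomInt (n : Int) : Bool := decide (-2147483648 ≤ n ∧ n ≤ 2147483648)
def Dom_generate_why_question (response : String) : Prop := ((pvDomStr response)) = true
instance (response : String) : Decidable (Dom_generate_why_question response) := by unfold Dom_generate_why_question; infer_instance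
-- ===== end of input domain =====

-- B fuses A's staged passes (two guard scans + seven per-key conditional-map rescans) into one
-- pass over the words, translating each word with an if/elif chain as it goes; same output, simpler.


-- ===== PORT A =====
-- A's replaceit dict, as an insertion-ordered association list (keys are distinct)
def pvReplacePairs : List (String × String) :=
  [("i", "you"), ("am", "are"), ("me", "you"), ("mine", "yours"),
   ("my", "your"), ("myself", "yourself"), ("because", "")]

def generate_why_question (response : String) : String :=
  let rlist := PySem.Str.split₀ (PySem.Str.strip (PySem.Str.lower response))
  -- for i in ["you","yours"]: if i in rlist: return …   (unrolled)
  if rlist.contains "you" then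
    "Please don't bring me into this.  I am concerned with you."
  else if rlist.contains "yours" then
    "Please don't bring me into this.  I am concerned with you."
  else
    -- for word in replaceit.keys(): rlist = [replaceit.get(word) if item == word else item …]
    let rlist2 := pvReplacePairs.foldl
      (fun rl wv => rl.map (fun item => if item == wv.1 then wv.2 else item)) rlist
    "Why do " ++ PySem.Str.strip (PySem.Str.join " " rlist2) ++ "?"

-- ===== PORT B =====
-- the if/elif translation chain of Source B
def pvTranslate (w : String) : String :=
  if w == "i" then "you"
  else if w == "am" then "are"
  else if w == "me" then "you"
  else if w == "mine" then "yours"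
  else if w == "my" then "your"
  else if w == "myself" then "yourself"
  else if w == "because" then ""
  else w

-- Source B's single loop with early return, as structural recursion over the words (acc kept reversed)
def pvWhyGo : List String → List String → String
  | [], acc => "Why do " ++ PySem.Str.strip (PySem.Str.join " " acc.reverse) ++ "?"
  | w :: ws, acc =>
    if w == "you" || w == "yours" then
      "Please don't bring me into this.  I am concerned with you."
    else pvWhyGo ws (pvTranslate w :: acc)

def generate_why_question_alt (response : String) : String :=
  pvWhyGo (PySem.Str.split₀ (PySem.Str.strip (PySem.Str.lower response))) []

-- ===== PRECONDITION & SPEC =====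
def Spec_generate_why_question (response : String) (out : String) : Prop := out = generate_why_question_alt response
instance (response : String) (out : String) : Decidable (Spec_generate_why_question response out) := by unfold Spec_generate_why_question; infer_instance

-- ===== CLAIM =====
def Claim_equal_generate_why_question : Prop := ∀ (response : String), Dom_generate_why_question response → Spec_generate_why_question response (generate_why_question response)

-- ===== LEMMAS AND PROOFS =====

-- the seven sequential one-key substitutions applied to a single word equal B's if/elif chain
lemma pvChain_eq_translate (w : String) :
    (pvReplacePairs.foldl (fun x wv => if x == wv.1 then wv.2 else x) w) = pvTranslate w := by
  by_cases h1 : w = "i"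
  · subst h1; decide
  by_cases h2 : w = "am"
  · subst h2; decide
  by_cases h3 : w = "me"
  · subst h3; decide
  by_cases h4 : w = "mine"
  · subst h4; decide
  by_cases h5 : w = "my"
  · subst h5; decide
  by_cases h6 : w = "myself"
  · subst h6; decide
  by_cases h7 : w = "because"
  · subst h7; decide
  · simp [pvReplacePairs, pvTranslate, List.foldl, h1, h2, h3, h4, h5, h6, h7]

-- A's seven conditional-map passes equal one map of the chain
lemma pvFoldl_maps_eq (rl : List String) :
    (pvReplacePairs.foldl
      (fun rl wv => rl.map (fun item => if item == wv.1 then wv.2 else item)) rl)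
      = rl.map pvTranslate := by
  have h : (pvReplacePairs.foldl
      (fun rl wv => rl.map (fun item => if item == wv.1 then wv.2 else item)) rl)
      = rl.map (fun w => pvReplacePairs.foldl (fun x wv => if x == wv.1 then wv.2 else x) w) := by
    simp [pvReplacePairs, List.foldl, List.map_map, Function.comp]
  rw [h]
  exact List.map_congr_left (fun w _ => pvChain_eq_translate w)

-- characterisation of B's fused loop
lemma pvWhyGo_spec (ws acc : List String) :
    pvWhyGo ws acc =
      if ws.contains "you" || ws.contains "yours" then
        "Please don't bring me into this.  I am concerned with you."
      else
        "Why do " ++ PySem.Str.strip (PySem.Str.join " " (acc.reverse ++ ws.map pvTranslate)) ++ "?" := by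
  induction ws generalizing acc with
  | nil => simp [pvWhyGo]
  | cons w ws ih =>
    by_cases hw : w = "you" ∨ w = "yours"
    · rcases hw with hw | hw <;> subst hw <;> simp [pvWhyGo]
    · push_neg at hw
      obtain ⟨h1, h2⟩ := hw
      simp [pvWhyGo, h1, h2, Ne.symm h1, Ne.symm h2, ih]

-- ===== VERDICT =====
theorem generate_why_question_spec : Claim_equal_generate_why_question := by
  intro response _
  unfold Spec_generate_why_question generate_why_question generate_why_question_alt
  simp only [pvFoldl_maps_eq, pvWhyGo_spec]
  by_cases hy : "you" ∈ PySem.Str.split₀ (PySem.Str.strip (PySem.Str.lower response))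
  · simp [hy]
  by_cases hys : "yours" ∈ PySem.Str.split₀ (PySem.Str.strip (PySem.Str.lower response))
  · simp [hy, hys]
  · simp [hy, hys]
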